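-- pv_equiv track=rewrite | github.com/primrose101/CS322 | KeywordLexer.py | kwinteger_fsm
-- ===== SOURCE A (Python) =====
-- def kwinteger_fsm(string_input, index):
--     i = index
--
--     table = [
--         [1,8,8,8,8,8,8,8],
--         [8,2,8,8,8,8,8,8],
--         [8,8,3,8,8,8,8,8],
--         [8,8,8,4,8,8,8,8],
--         [8,8,8,8,5,8,8,8],
--         [8,8,8,6,8,8,8,8],
--         [8,8,8,8,8,8,7,8],
--         [8,8,8,8,8,8,8,8],
--         [8,8,8,8,8,8,8,8],
--
--     ]
--
--     state = 0
--     inputstate = 0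
--
--     string_length = len(string_input)
--
--     while i != string_length:
--         if string_input[i] == 'I':
--             inputstate = 0
--         elif string_input[i] == 'N':
--             inputstate = 1
--         elif string_input[i] == 'T':
--             inputstate = 2
--         elif string_input[i] == 'E':
--             inputstate = 3
--         elif string_input[i] == 'G':
--             inputstate = 4
--         elif string_input[i] == 'E':
--             inputstate = 5
--         elif string_input[i] == 'R':
--             inputstate = 6
--         else:
--             inputstate = 7
--
--         state = table[state][inputstate]
--
--         if state == 8:
--             break
--
--         i += 1
--
--     return i - index
-- ===== SOURCE B (Python) =====
-- def kwinteger_fsm(string_input, index):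
--     keyword = "INTEGER"
--     count = 0
--     i = index
--     n = len(string_input)
--     while i != n and count < 7 and string_input[i] == keyword[count]:
--         i += 1
--         count += 1
--     return count
-- ===== Notes on version B (the rewrite author's own statement) =====
-- stated objective: simpler
-- what changed: Replaced the 9x8 transition-table state machine with a direct character-by-character comparison against the literal keyword 'INTEGER', returning the matched count.
import Mathlib
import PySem

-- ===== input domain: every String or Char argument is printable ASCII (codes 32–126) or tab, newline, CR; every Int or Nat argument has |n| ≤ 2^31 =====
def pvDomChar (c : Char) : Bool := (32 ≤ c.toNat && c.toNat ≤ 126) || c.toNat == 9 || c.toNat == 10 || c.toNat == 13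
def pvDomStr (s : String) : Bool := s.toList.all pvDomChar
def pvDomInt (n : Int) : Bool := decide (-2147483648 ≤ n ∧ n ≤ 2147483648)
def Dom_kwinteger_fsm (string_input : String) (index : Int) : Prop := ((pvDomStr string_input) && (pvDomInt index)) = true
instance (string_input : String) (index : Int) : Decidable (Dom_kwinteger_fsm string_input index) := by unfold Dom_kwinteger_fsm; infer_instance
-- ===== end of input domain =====

-- B replaces A's 9x8 transition-table state machine by a direct comparison against the
-- literal keyword "INTEGER" (objective: simpler). Equivalence on the return value is proved
-- on Pre_ (the indices where Python A returns instead of raising IndexError).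

-- ===== PORT A =====
def kwTable : List (List Int) :=
  [[1,8,8,8,8,8,8,8],
   [8,2,8,8,8,8,8,8],
   [8,8,3,8,8,8,8,8],
   [8,8,8,4,8,8,8,8],
   [8,8,8,8,5,8,8,8],
   [8,8,8,6,8,8,8,8],
   [8,8,8,8,8,8,7,8],
   [8,8,8,8,8,8,8,8],
   [8,8,8,8,8,8,8,8]]

-- the if/elif chain of A (the second `elif == 'E'` branch is dead in Python, kept for fidelity)
def kwInputState (c : Char) : Int :=
  if c = 'I' then 0
  else if c = 'N' then 1
  else if c = 'T' then 2
  else if c = 'E' then 3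
  else if c = 'G' then 4
  else if c = 'E' then 5
  else if c = 'R' then 6
  else 7

-- A's while loop; fuel bounds the iterations (i increases by 1 per step towards n);
-- on an out-of-range index Python raises IndexError: those inputs are outside Pre_,
-- the port returns i there.
def kwAloop (s : List Char) (n : Int) (state i : Int) : Nat → Int
  | 0 => i
  | fuel+1 =>
    if i = n then i
    else
      match PySem.List.pyGet? s i with
      | none => i
      | some c =>
        let inputstate := kwInputState c
        let state' := (PySem.List.pyGet? ((PySem.List.pyGet? kwTable state).getD []) inputstate).getD 8
        if state' = 8 then i
        else kwAloop s n state' (i+1) fuel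

def kwinteger_fsm (string_input : String) (index : Int) : Int :=
  let s := string_input.toList
  let n : Int := (s.length : Int)
  kwAloop s n 0 index ((n - index).toNat + 8) - index

-- ===== PORT B =====
def kwChars : List Char := "INTEGER".toList

-- B's while loop: compare against the keyword directly; count < 7 bounds it, fuel 8 suffices
def kwBloop (s : List Char) (n : Int) (count i : Int) : Nat → Int
  | 0 => count
  | fuel+1 =>
    if i = n then count
    else if count < 7 then
      match PySem.List.pyGet? s i, PySem.List.pyGet? kwChars count with
      | some c, some k => if c = k then kwBloop s n (count+1) (i+1) fuel else count
      | _, _ => count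
    else count

def kwinteger_fsm_alt (string_input : String) (index : Int) : Int :=
  let s := string_input.toList
  kwBloop s ((s.length : Int)) 0 index 8

-- ===== PRECONDITION & SPEC =====
-- Pre_ excludes exactly the indices on which Python A raises IndexError (index out of
-- [-len, len]); A returns on every input admitted here.
def Pre_kwinteger_fsm (string_input : String) (index : Int) : Prop :=
  -(string_input.toList.length : Int) ≤ index ∧ index ≤ (string_input.toList.length : Int)
instance (string_input : String) (index : Int) : Decidable (Pre_kwinteger_fsm string_input index) := by unfold Pre_kwinteger_fsm; infer_instance

def pvWitness_kwinteger_fsm : String × Int := ("INTEGER x", 0)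

def Spec_kwinteger_fsm (string_input : String) (index : Int) (out : Int) : Prop := out = kwinteger_fsm_alt string_input index
instance (string_input : String) (index : Int) (out : Int) : Decidable (Spec_kwinteger_fsm string_input index out) := by unfold Spec_kwinteger_fsm; infer_instance

-- ===== CLAIM (what is proved, stated in full; the proofs are below) =====
def Claim_equal_kwinteger_fsm : Prop := ∀ (string_input : String) (index : Int), Dom_kwinteger_fsm string_input index → Pre_kwinteger_fsm string_input index → Spec_kwinteger_fsm string_input index (kwinteger_fsm string_input index)

-- ===== LEMMAS AND PROOFS =====

-- the table encodes exactly "advance on the next keyword character, else reject":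
-- a matching character moves state count to count+1 ...
lemma kwStepMatch (c k : Char) (count : Int) (h0 : 0 ≤ count) (h7 : count < 7)
    (hk : PySem.List.pyGet? kwChars count = some k) (hck : c = k) :
    (PySem.List.pyGet? ((PySem.List.pyGet? kwTable count).getD []) (kwInputState c)).getD 8 = count + 1 := by
  subst hck
  have e0 : PySem.List.pyGet? kwChars 0 = some 'I' := by decide
  have e1 : PySem.List.pyGet? kwChars 1 = some 'N' := by decide
  have e2 : PySem.List.pyGet? kwChars 2 = some 'T' := by decide
  have e3 : PySem.List.pyGet? kwChars 3 = some 'E' := by decide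
  have e4 : PySem.List.pyGet? kwChars 4 = some 'G' := by decide
  have e5 : PySem.List.pyGet? kwChars 5 = some 'E' := by decide
  have e6 : PySem.List.pyGet? kwChars 6 = some 'R' := by decide
  interval_cases count <;>
    (first
      | (have hkk := Option.some.inj (e0.symm.trans hk))
      | (have hkk := Option.some.inj (e1.symm.trans hk))
      | (have hkk := Option.some.inj (e2.symm.trans hk))
      | (have hkk := Option.some.inj (e3.symm.trans hk))
      | (have hkk := Option.some.inj (e4.symm.trans hk))
      | (have hkk := Option.some.inj (e5.symm.trans hk))
      | (have hkk := Option.some.inj (e6.symm.trans hk))) <;>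
    (subst hkk; decide)

-- ... and any other character rejects (state 8)
lemma kwStepMiss (c k : Char) (count : Int) (h0 : 0 ≤ count) (h7 : count < 7)
    (hk : PySem.List.pyGet? kwChars count = some k) (hck : ¬ c = k) :
    (PySem.List.pyGet? ((PySem.List.pyGet? kwTable count).getD []) (kwInputState c)).getD 8 = 8 := by
  have e0 : PySem.List.pyGet? kwChars 0 = some 'I' := by decide
  have e1 : PySem.List.pyGet? kwChars 1 = some 'N' := by decide
  have e2 : PySem.List.pyGet? kwChars 2 = some 'T' := by decide
  have e3 : PySem.List.pyGet? kwChars 3 = some 'E' := by decide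
  have e4 : PySem.List.pyGet? kwChars 4 = some 'G' := by decide
  have e5 : PySem.List.pyGet? kwChars 5 = some 'E' := by decide
  have e6 : PySem.List.pyGet? kwChars 6 = some 'R' := by decide
  interval_cases count <;>
    (first
      | (have hkk := Option.some.inj (e0.symm.trans hk))
      | (have hkk := Option.some.inj (e1.symm.trans hk))
      | (have hkk := Option.some.inj (e2.symm.trans hk))
      | (have hkk := Option.some.inj (e3.symm.trans hk))
      | (have hkk := Option.some.inj (e4.symm.trans hk))
      | (have hkk := Option.some.inj (e5.symm.trans hk))
      | (have hkk := Option.some.inj (e6.symm.trans hk))) <;>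
    (subst hkk; simp only [kwInputState];
     split_ifs <;> (first | (exact absurd (by assumption) hck) | decide))

-- row 7 of the table rejects every input class
lemma kwStep7 (c : Char) :
    (PySem.List.pyGet? ((PySem.List.pyGet? kwTable (7 : Int)).getD []) (kwInputState c)).getD 8 = 8 := by
  simp only [kwInputState, kwTable]
  split_ifs <;> rfl

-- loop invariant: A's state equals B's count; the two loops advance in lock-step and
-- A's final i exceeds B's final count by the common offset i - count.
lemma kwLoop_eq (s : List Char) (n : Int) :
    ∀ (fA fB : Nat) (count i : Int), 0 ≤ count → count ≤ 7 →
      (7 - count).toNat < fA → (7 - count).toNat < fB →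
      kwAloop s n count i fA = i + (kwBloop s n count i fB - count) := by
  intro fA
  induction fA with
  | zero => intro fB count i h0 h7 hfA hfB; omega
  | succ fA ih =>
    intro fB count i h0 h7 hfA hfB
    obtain ⟨fB', rfl⟩ : ∃ fB', fB = fB' + 1 := ⟨fB - 1, by omega⟩
    by_cases hi : i = n
    · simp [kwAloop, kwBloop, hi]
    · rcases hc : PySem.List.pyGet? s i with _ | c
      · simp [kwAloop, kwBloop, hi, hc]
      · by_cases h77 : count < 7
        · obtain ⟨k, hk⟩ : ∃ k, PySem.List.pyGet? kwChars count = some k := by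
            interval_cases count <;> exact ⟨_, rfl⟩
          by_cases hck : c = k
          · subst hck
            have hs := kwStepMatch _ _ count h0 h77 hk rfl
            have h8 : ¬ (count + 1 = 8) := by omega
            simp only [kwAloop, kwBloop, if_neg hi, hc, hk, if_pos h77, hs, if_neg h8]
            rw [ih fB' (count + 1) (i + 1) (by omega) (by omega) (by omega) (by omega)]
            ring_nf
            simp
          · have hs := kwStepMiss c k count h0 h77 hk hck
            simp only [kwAloop, kwBloop, if_neg hi, hc, hk, if_pos h77, hs, if_neg hck]
            norm_num
        · have hcount : count = 7 := by omega
          subst hcount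
          simp [kwAloop, kwBloop, hi, hc, kwStep7]

-- ===== VERDICT (by name: the statement is the Claim_ definition above) =====
theorem kwinteger_fsm_spec : Claim_equal_kwinteger_fsm := by
  intro string_input index _ _
  show _ = _
  unfold kwinteger_fsm kwinteger_fsm_alt
  have := kwLoop_eq string_input.toList ((string_input.toList.length : Int))
    (((string_input.toList.length : Int) - index).toNat + 8) 8 0 index
    (by omega) (by omega) (by omega) (by omega)
  simp only at this ⊢
  rw [this]
  ring
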